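-- pv_equiv track=rewrite | github.com/jkleinau/aufmassConverterPy | csvImport.py | get_subsection
-- ===== SOURCE A (Python) =====
-- def get_subsection(subsection, data):
--     subsection_data = []
--     header_found = False
--     for entry in data:
--         if not header_found:
--             header_found = subsection in entry
--         if entry and header_found:
--             subsection_data.append(entry)
--         else:
--             header_found = False
--     return subsection_data
-- ===== SOURCE B (Python) =====
-- def get_subsection(subsection, data):
--     # Phase 1: partition data into maximal contiguous blocks of truthy rows.
--     blocks = []
--     cur = []
--     for entry in data:
--         if entry:
--             cur.append(entry)
--         else:
--             if cur:
--                 blocks.append(cur)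
--             cur = []
--     if cur:
--         blocks.append(cur)
--     # Phase 2: per block, take the suffix from the first row containing subsection.
--     out = []
--     for block in blocks:
--         for i, row in enumerate(block):
--             if subsection in row:
--                 out.extend(block[i:])
--                 break
--     return out
-- ===== Notes on version B (the rewrite author's own statement) =====
-- stated objective: alternative
-- what changed: Replaces A's fused header_found state machine by a two-phase shape: first partition data into maximal contiguous runs of non-empty rows, then for each run emit the suffix starting at the first row containing subsection.
import Mathlib
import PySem

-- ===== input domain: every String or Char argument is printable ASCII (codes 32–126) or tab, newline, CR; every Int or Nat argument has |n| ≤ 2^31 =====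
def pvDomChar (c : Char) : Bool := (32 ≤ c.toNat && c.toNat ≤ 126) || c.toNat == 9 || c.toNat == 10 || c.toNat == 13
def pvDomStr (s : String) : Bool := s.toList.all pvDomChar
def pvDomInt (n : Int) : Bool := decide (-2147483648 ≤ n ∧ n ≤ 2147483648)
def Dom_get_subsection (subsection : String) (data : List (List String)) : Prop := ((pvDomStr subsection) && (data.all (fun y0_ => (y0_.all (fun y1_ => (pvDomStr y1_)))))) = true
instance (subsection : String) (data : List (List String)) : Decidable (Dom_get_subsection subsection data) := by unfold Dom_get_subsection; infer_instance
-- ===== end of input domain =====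

-- B replaces A's fused header_found state machine by partition-into-blocks then per-block suffix; alternative decomposition, same cost.

-- ===== PORT A =====
-- A's single fold over (subsection_data, header_found)
def get_subsection (subsection : String) (data : List (List String)) : List (List String) :=
  (data.foldl (fun (st : List (List String) × Bool) entry =>
      let hf : Bool := if st.2 then true else decide (subsection ∈ entry)
      if entry ≠ [] ∧ hf = true then (st.1 ++ [entry], hf) else (st.1, false))
    ([], false)).1

-- ===== PORT B =====
-- phase-2 inner loop of Source B: suffix of the block from the first row containing subsection
def gsPick (s : String) : List (List String) → List (List String)
  | [] => []
  | row :: rest => if s ∈ row then row :: rest else gsPick s rest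

-- phase-1 step of Source B: accumulate maximal contiguous runs of non-empty rows
def gsStep (st : List (List (List String)) × List (List String)) (entry : List String) :
    List (List (List String)) × List (List String) :=
  if entry ≠ [] then (st.1, st.2 ++ [entry])
  else if st.2 ≠ [] then (st.1 ++ [st.2], []) else st

def get_subsection_alt (subsection : String) (data : List (List String)) : List (List String) :=
  let st := data.foldl gsStep ([], [])
  let blocks := if st.2 ≠ [] then st.1 ++ [st.2] else st.1
  blocks.foldl (fun out b => out ++ gsPick subsection b) []

-- ===== PRECONDITION & SPEC =====
def Spec_get_subsection (subsection : String) (data : List (List String)) (out : List (List String)) : Prop := out = get_subsection_alt subsection data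
instance (subsection : String) (data : List (List String)) (out : List (List String)) : Decidable (Spec_get_subsection subsection data out) := by unfold Spec_get_subsection; infer_instance

-- ===== CLAIM (what is proved, stated in full; the proofs are below) =====
def Claim_equal_get_subsection : Prop := ∀ (subsection : String) (data : List (List String)), Dom_get_subsection subsection data → Spec_get_subsection subsection data (get_subsection subsection data)

-- ===== LEMMAS AND PROOFS =====

theorem gsPick_eq_nil {s : String} {xs : List (List String)} (h : ∀ r ∈ xs, s ∉ r) :
    gsPick s xs = [] := by
  induction xs with
  | nil => rfl
  | cons r rest ih =>
      simp only [gsPick]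
      rw [if_neg (h r (by simp))]
      exact ih (fun r hr => h r (by simp [hr]))

theorem gsPick_append_match {s : String} {xs : List (List String)} (e : List String)
    (h : ∃ r ∈ xs, s ∈ r) : gsPick s (xs ++ [e]) = gsPick s xs ++ [e] := by
  induction xs with
  | nil => simp at h
  | cons r rest ih =>
      by_cases hr : s ∈ r
      · simp [gsPick, hr]
      · have h' : ∃ r ∈ rest, s ∈ r := by
          rcases h with ⟨r', hr', hs⟩
          rcases List.mem_cons.mp hr' with rfl | hr2
          · exact absurd hs hr
          · exact ⟨r', hr2, hs⟩
        simp [gsPick, hr, ih h']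

theorem gsPick_append_nomatch {s : String} {xs : List (List String)} (e : List String)
    (h : ∀ r ∈ xs, s ∉ r) : gsPick s (xs ++ [e]) = if s ∈ e then [e] else [] := by
  induction xs with
  | nil => rfl
  | cons r rest ih =>
      simp only [List.cons_append, gsPick]
      rw [if_neg (h r (by simp))]
      exact ih (fun r hr => h r (by simp [hr]))

theorem gsOut_foldl (s : String) (l : List (List (List String))) (acc : List (List String)) :
    l.foldl (fun out b => out ++ gsPick s b) acc = acc ++ l.flatMap (gsPick s) := by
  induction l generalizing acc with
  | nil => simp
  | cons b rest ih => simp [List.foldl_cons, ih, List.append_assoc]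

-- the finished block list and its flattened picks
def gsFinish (st : List (List (List String)) × List (List String)) :
    List (List (List String)) :=
  if st.2 ≠ [] then st.1 ++ [st.2] else st.1

theorem gs_main (s : String) (data : List (List String))
    (blocks : List (List (List String))) (cur acc : List (List String)) (hf : Bool)
    (hacc : acc = blocks.flatMap (gsPick s) ++ gsPick s cur)
    (hhf : hf = true ↔ ∃ r ∈ cur, s ∈ r) :
    (data.foldl (fun (st : List (List String) × Bool) entry =>
        let hf : Bool := if st.2 then true else decide (s ∈ entry)
        if entry ≠ [] ∧ hf = true then (st.1 ++ [entry], hf) else (st.1, false))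
      (acc, hf)).1
    = (gsFinish (data.foldl gsStep (blocks, cur))).flatMap (gsPick s) := by
  induction data generalizing blocks cur acc hf with
  | nil =>
      simp only [List.foldl_nil, gsFinish]
      by_cases hc : cur = []
      · subst hc; simpa [gsPick] using hacc
      · simp [hc, hacc]
  | cons e rest ih =>
      simp only [List.foldl_cons]
      by_cases he : e = []
      · subst he
        have hA : ((if ([] : List String) ≠ [] ∧ (if hf then true else decide (s ∈ ([] : List String))) = true
              then (acc ++ [[]], if hf then true else decide (s ∈ ([] : List String))) else (acc, false))
              : List (List String) × Bool) = (acc, false) := by simp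
        rw [hA]
        by_cases hc : cur = []
        · subst hc
          have hB : gsStep (blocks, []) [] = (blocks, []) := by simp [gsStep]
          rw [hB]
          exact ih blocks [] acc false (by simpa [gsPick] using hacc) (by simp)
        · have hB : gsStep (blocks, cur) [] = (blocks ++ [cur], []) := by simp [gsStep, hc]
          rw [hB]
          refine ih (blocks ++ [cur]) [] acc false ?_ (by simp)
          simp [hacc, gsPick]
      · have hB : gsStep (blocks, cur) e = (blocks, cur ++ [e]) := by simp [gsStep, he]
        rw [hB]
        by_cases hhf' : (if hf then true else decide (s ∈ e)) = true
        · have hA : ((if e ≠ [] ∧ (if hf then true else decide (s ∈ e)) = true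
              then (acc ++ [e], if hf then true else decide (s ∈ e)) else (acc, false))
              : List (List String) × Bool)
              = (acc ++ [e], if hf then true else decide (s ∈ e)) := by
            rw [if_pos ⟨he, hhf'⟩]
          rw [hA, hhf']
          refine ih blocks (cur ++ [e]) (acc ++ [e]) true ?_ ?_
          · by_cases hmf : hf = true
            · have hm : ∃ r ∈ cur, s ∈ r := hhf.mp hmf
              rw [gsPick_append_match e hm, hacc, List.append_assoc]
            · have hnm : ∀ r ∈ cur, s ∉ r := by
                intro r hr hs
                exact hmf (hhf.mpr ⟨r, hr, hs⟩)
              have hse : s ∈ e := by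
                simp [hmf] at hhf'
                exact hhf'
              rw [gsPick_append_nomatch e hnm, if_pos hse, hacc,
                  gsPick_eq_nil hnm]
              simp
          · constructor
            · intro _
              by_cases hmf : hf = true
              · rcases hhf.mp hmf with ⟨r, hr, hs⟩
                exact ⟨r, by simp [hr], hs⟩
              · have hse : s ∈ e := by simp [hmf] at hhf'; exact hhf'
                exact ⟨e, by simp, hse⟩
            · intro _; rfl
        · have hmf : hf = false := by
            cases hf with
            | false => rfl
            | true => exact absurd (by simp) hhf'
          have hse : s ∉ e := by
            subst hmf; simpa using hhf'
          have hA : ((if e ≠ [] ∧ (if hf then true else decide (s ∈ e)) = true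
              then (acc ++ [e], if hf then true else decide (s ∈ e)) else (acc, false))
              : List (List String) × Bool) = (acc, false) := by
            rw [if_neg]; intro h; exact hhf' h.2
          rw [hA]
          have hnm : ∀ r ∈ cur, s ∉ r := by
            intro r hr hs
            exact (by simp [hmf] : ¬ hf = true) (hhf.mpr ⟨r, hr, hs⟩)
          refine ih blocks (cur ++ [e]) acc false ?_ ?_
          · rw [gsPick_append_nomatch e hnm, if_neg hse, hacc, gsPick_eq_nil hnm]
          · constructor
            · intro h; simp at h
            · rintro ⟨r, hr, hs⟩
              rcases List.mem_append.mp hr with hr | hr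
              · exact absurd hs (hnm r hr)
              · simp at hr; exact absurd (hr ▸ hs) hse

-- ===== VERDICT (by name: the statement is the Claim_ definition above) =====
theorem get_subsection_spec : Claim_equal_get_subsection := by
  intro subsection data _
  unfold Spec_get_subsection get_subsection get_subsection_alt
  rw [gs_main subsection data [] [] [] false (by simp [gsPick]) (by simp)]
  rw [gsOut_foldl]
  simp [gsFinish]
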